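-- pv_equiv track=rewrite | github.com/StinkyMilo/Prosetta | LetterFrequency/trigger_detection.py | get_triggers
-- ===== SOURCE A (Python) =====
-- class Progress:
--     def __init__(self, alias):
--         self.alias: str = alias
--         self._num: int = 0
--         self.alias_start: int = -1
--         self.alias_end: int = -1
--         self.total_location_value: int = 0
--
--     @property
--     def letter(self) -> str:
--         if self._num == len(self.alias):
--             return ""
--         return self.alias[self._num]
--
--     def inc(self,index):
--         if self._num < len(self.alias):
--             if self._num == 0:
--                 self.alias_start = index
--             self.total_location_value += index
--             self._num += 1
--         if self._num == len(self.alias):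
--             self.alias_end = index
--             return True
--         return False
--
-- def get_triggers(word: str, commands: list[str]) -> list[str]:
--     interp = [Progress(command) for command in commands]
--     triggers: list[str] = []
--     i = 0
--     for letter in word:
--         for progress in interp:
--             if progress.letter == letter and progress.inc(i):
--                 triggers.append(progress.alias)
--         i+=1
--     return triggers
-- ===== SOURCE B (Python) =====
-- def _match_end(word, cmd):
--     """Index in word at which non-empty cmd completes as a greedy subsequence, else None."""
--     j = 0
--     for i, ch in enumerate(word):
--         if ch == cmd[j]:
--             j += 1
--             if j == len(cmd):
--                 return i
--     return None
--
-- def get_triggers(word: str, commands: list[str]) -> list[str]: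
--     by_end = {}
--     for cmd in commands:
--         if not cmd:
--             continue
--         end = _match_end(word, cmd)
--         if end is not None:
--             by_end.setdefault(end, []).append(cmd)
--     return [cmd for end in sorted(by_end) for cmd in by_end[end]]
-- ===== Notes on version B (the rewrite author's own statement) =====
-- stated objective: faster
-- what changed: A simulates all commands letter-by-letter over the word (a Progress object per command advanced/inspected on every word letter); B instead greedily matches each command against the word on its own with early exit at completion, groups completed commands by completion index in a dict, and emits the groups in sorted key order.
import Mathlib
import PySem

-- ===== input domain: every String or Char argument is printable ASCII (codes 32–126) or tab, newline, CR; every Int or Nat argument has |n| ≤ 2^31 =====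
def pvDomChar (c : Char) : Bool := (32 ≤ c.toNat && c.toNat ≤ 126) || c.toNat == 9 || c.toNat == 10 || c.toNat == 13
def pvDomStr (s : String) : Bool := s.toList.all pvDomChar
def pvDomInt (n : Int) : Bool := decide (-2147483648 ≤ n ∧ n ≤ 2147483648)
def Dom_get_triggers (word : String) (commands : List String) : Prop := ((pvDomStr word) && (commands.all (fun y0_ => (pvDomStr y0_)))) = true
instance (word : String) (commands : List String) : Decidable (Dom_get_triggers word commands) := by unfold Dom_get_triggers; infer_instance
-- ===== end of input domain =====

-- B replaces A's letter-major simulation (every command advanced one Progress object per word letter) by a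
-- command-major scan: each command is greedily matched against the word once, completions are grouped by end
-- index in a dict, and the groups are emitted in sorted key order (objective: faster — measured constant-factor speedup from early exit and no per-pair object overhead).

-- ===== PORT A =====
structure PyProgress where
  aliasStr : String
  num : Int
  aliasStart : Int
  aliasEnd : Int
  totalLocationValue : Int
deriving Repr, DecidableEq

-- Progress.letter: Python returns "" (modelled none) or the 1-char string alias[_num] (modelled some c)
def progLetter (p : PyProgress) : Option Char :=
  if p.num == PySem.Str.len p.aliasStr then none
  else PySem.Str.pyGet? p.aliasStr p.num

def progInc (p : PyProgress) (index : Int) : Bool × PyProgress :=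
  let p1 := if p.num < PySem.Str.len p.aliasStr then
      { p with aliasStart := if p.num == 0 then index else p.aliasStart,
               totalLocationValue := p.totalLocationValue + index,
               num := p.num + 1 }
    else p
  if p1.num == PySem.Str.len p1.aliasStr then (true, { p1 with aliasEnd := index }) else (false, p1)

-- body of 'for progress in interp', mutating the progress list and appending triggers
def innerStep (i : Int) (letter : Char) (acc : List PyProgress × List String) (progress : PyProgress) :
    List PyProgress × List String :=
  if progLetter progress == some letter then
    let r := progInc progress i
    (acc.1 ++ [r.2], if r.1 then acc.2 ++ [r.2.aliasStr] else acc.2)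
  else (acc.1 ++ [progress], acc.2)

-- body of 'for letter in word' with state (interp, triggers, i)
def outerStep (st : List PyProgress × List String × Int) (letter : Char) :
    List PyProgress × List String × Int :=
  let inner := st.1.foldl (innerStep st.2.2 letter) ([], st.2.1)
  (inner.1, inner.2, st.2.2 + 1)

def get_triggers (word : String) (commands : List String) : List String :=
  let interp := commands.map (fun command =>
    ({ aliasStr := command, num := 0, aliasStart := -1, aliasEnd := -1, totalLocationValue := 0 } : PyProgress))
  (word.toList.foldl outerStep (interp, ([], 0))).2.1

-- ===== PORT B =====
-- _match_end's loop 'for i, ch in enumerate(word)' with pointer j into cmd;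
-- ch == cmd[j] is ported via pyGet? (j stays < len(cmd): the port callers pass non-empty cmd)
def matchEndGo (cmd : List Char) (pairs : List (Int × Char)) (j : Int) : Option Int :=
  match pairs with
  | [] => none
  | (i, ch) :: rest =>
    if PySem.List.pyGet? cmd j == some ch then
      if j + 1 == PySem.List.len cmd then some i
      else matchEndGo cmd rest (j + 1)
    else matchEndGo cmd rest j

def matchEnd (word cmd : List Char) : Option Int :=
  matchEndGo cmd (PySem.List.enumerate word 0) 0

-- body of 'for cmd in commands' building by_end (setdefault(end, []).append(cmd) = modify end [] (· ++ [cmd]))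
def altStep (w : List Char) (d : PySem.Dict Int (List String)) (cmd : String) :
    PySem.Dict Int (List String) :=
  if cmd == "" then d
  else match matchEnd w cmd.toList with
    | none => d
    | some e => d.modify e [] (fun v => v ++ [cmd])

def get_triggers_alt (word : String) (commands : List String) : List String :=
  let byEnd := commands.foldl (altStep word.toList) PySem.Dict.empty
  (PySem.List.sorted byEnd.keys (fun e => e)).flatMap (fun e => byEnd.getD e [])  -- by_end[e]: e is a key

-- ===== PRECONDITION & SPEC =====
def Spec_get_triggers (word : String) (commands : List String) (out : List String) : Prop := out = get_triggers_alt word commands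
instance (word : String) (commands : List String) (out : List String) : Decidable (Spec_get_triggers word commands out) := by unfold Spec_get_triggers; infer_instance

-- ===== CLAIM (what is proved, stated in full; the proofs are below) =====
def Claim_equal_get_triggers : Prop := ∀ (word : String) (commands : List String), Dom_get_triggers word commands → Spec_get_triggers word commands (get_triggers word commands)

-- ===== LEMMAS AND PROOFS =====

def chStep (x : Char) : List Char → List Char
  | [] => []
  | y :: c' => if x == y then c' else y :: c'

-- completion index of c as a greedy subsequence of w (the common characterisation of both ports)
def findEnd : List Char → List Char → Option Int
  | [], _ => none
  | _ :: _, [] => none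
  | x :: w', y :: c' =>
    if chStep x (y :: c') = [] then some 0
    else match findEnd w' (chStep x (y :: c')) with
      | none => none
      | some s => some (s + 1)

def triggersSpec (w : List Char) (commands : List String) : List String :=
  (List.range w.length).flatMap (fun (t : Nat) => commands.filter (fun c => findEnd w c.toList == some (t : Int)))

def remOf (p : PyProgress) : List Char := p.aliasStr.toList.drop p.num.toNat

def InvP (p : PyProgress) : Prop := 0 ≤ p.num ∧ p.num ≤ (p.aliasStr.toList.length : Int)

def stepP (i : Int) (ch : Char) (p : PyProgress) : PyProgress :=
  if progLetter p == some ch then (progInc p i).2 else p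

def donePB (i : Int) (ch : Char) (p : PyProgress) : Bool :=
  (progLetter p == some ch) && (progInc p i).1

lemma findEnd_nil_right (w : List Char) : findEnd w [] = none := by
  cases w <;> rfl

lemma findEnd_bounds (w : List Char) : ∀ (c : List Char) (e : Int), findEnd w c = some e →
    0 ≤ e ∧ e < (w.length : Int) := by
  induction w with
  | nil => intro c e h; simp [findEnd] at h
  | cons x w' ih =>
    intro c e h
    cases c with
    | nil => simp [findEnd] at h
    | cons y c' =>
      simp only [findEnd] at h
      by_cases hr : chStep x (y :: c') = []
      · rw [if_pos hr] at h
        simp only [Option.some.injEq] at h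
        subst h
        constructor
        · omega
        · simp only [List.length_cons]; push_cast; omega
      · rw [if_neg hr] at h
        cases hfe : findEnd w' (chStep x (y :: c')) with
        | none => rw [hfe] at h; simp at h
        | some s =>
          rw [hfe] at h
          simp only [Option.some.injEq] at h
          obtain ⟨hs0, hs1⟩ := ih _ _ hfe
          simp only [List.length_cons]
          push_cast
          omega

lemma findEnd_cons_zero (x : Char) (w' c : List Char) :
    findEnd (x :: w') c = some 0 ↔ c = [x] := by
  cases c with
  | nil => simp [findEnd]
  | cons y c' =>
    simp only [findEnd]
    by_cases hr : chStep x (y :: c') = []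
    · rw [if_pos hr]
      simp only [chStep] at hr
      by_cases hxy : x == y
      · rw [if_pos hxy] at hr
        subst hr
        simp [(beq_iff_eq.mp hxy).symm]
      · rw [if_neg hxy] at hr; simp at hr
    · rw [if_neg hr]
      constructor
      · intro h
        cases hfe : findEnd w' (chStep x (y :: c')) with
        | none => rw [hfe] at h; simp at h
        | some s =>
          rw [hfe] at h
          have := (findEnd_bounds w' _ _ hfe).1
          simp only [Option.some.injEq] at h
          omega
      · intro h
        exfalso
        apply hr
        rw [h]
        simp [chStep]

lemma findEnd_cons_succ (x : Char) (w' c : List Char) (k : Int) (hk : 0 ≤ k) :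
    findEnd (x :: w') c = some (k + 1) ↔ findEnd w' (chStep x c) = some k := by
  cases c with
  | nil => simp [findEnd, chStep, findEnd_nil_right]
  | cons y c' =>
    simp only [findEnd]
    by_cases hr : chStep x (y :: c') = []
    · rw [if_pos hr, hr, findEnd_nil_right]
      constructor
      · intro h; simp only [Option.some.injEq] at h; omega
      · intro h; simp at h
    · rw [if_neg hr]
      cases hfe : findEnd w' (chStep x (y :: c')) with
      | none => simp
      | some s => simp only [Option.some.injEq]; omega

lemma findEnd_cons_eq (x : Char) (w' c' : List Char) (h : c' ≠ []) :
    findEnd (x :: w') (x :: c') =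
      (match findEnd w' c' with | none => none | some s => some (s + 1)) := by
  have hch : chStep x (x :: c') = c' := by simp [chStep]
  simp only [findEnd, hch]
  rw [if_neg h]

lemma findEnd_cons_ne (x y : Char) (w' c' : List Char) (h : ¬ x = y) :
    findEnd (x :: w') (y :: c') =
      (match findEnd w' (y :: c') with | none => none | some s => some (s + 1)) := by
  have hch : chStep x (y :: c') = y :: c' := by simp [chStep, h]
  simp only [findEnd, hch]
  rw [if_neg (by simp)]

lemma alias_progInc (p : PyProgress) (i : Int) : ((progInc p i).2).aliasStr = p.aliasStr := by
  simp only [progInc]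
  (repeat' split) <;> rfl

lemma progLetter_eq_head (p : PyProgress) (h : InvP p) :
    progLetter p = (remOf p).head? := by
  obtain ⟨h0, h1⟩ := h
  have hlen : PySem.Str.len p.aliasStr = (p.aliasStr.toList.length : Int) := PySem.Str.len_eq _
  simp only [progLetter, remOf, List.head?_drop, PySem.Str.pyGet?, PySem.Chars.pyGet?]
  by_cases he : p.num = (p.aliasStr.toList.length : Int)
  · have hc : (p.num == PySem.Str.len p.aliasStr) = true := by rw [beq_iff_eq, hlen]; exact he
    rw [if_pos hc, List.getElem?_eq_none (by omega)]
  · have hc : ¬ (p.num == PySem.Str.len p.aliasStr) = true := by rw [beq_iff_eq, hlen]; exact he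
    rw [if_neg hc, PySem.List.pyGet?_of_nonneg _ h0]

lemma num_lt_of_letter_some (p : PyProgress) (h : InvP p) (ch : Char)
    (hm : progLetter p = some ch) : p.num < (p.aliasStr.toList.length : Int) := by
  rcases lt_or_eq_of_le h.2 with h2 | h2
  · exact h2
  · exfalso
    rw [progLetter] at hm
    rw [if_pos (by rw [beq_iff_eq, PySem.Str.len_eq]; exact h2)] at hm
    simp at hm

lemma num_progInc_of_lt (p : PyProgress) (i : Int)
    (hlt : p.num < (p.aliasStr.toList.length : Int)) :
    ((progInc p i).2).num = p.num + 1 ∧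
      ((progInc p i).1 = true ↔ p.num + 1 = (p.aliasStr.toList.length : Int)) := by
  have hlen : PySem.Str.len p.aliasStr = (p.aliasStr.toList.length : Int) := PySem.Str.len_eq _
  have hlt' : p.num < PySem.Str.len p.aliasStr := by rw [hlen]; exact hlt
  simp only [progInc, if_pos hlt']
  by_cases hd : p.num + 1 = (p.aliasStr.toList.length : Int)
  · have hd' : (p.num + 1 == PySem.Str.len p.aliasStr) = true := by rw [beq_iff_eq, hlen]; exact hd
    have hdl : p.num + 1 = (p.aliasStr.length : Int) := by rwa [String.length_toList] at hd
    simp only [hd', if_true]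
    simp [hdl]
  · have hd' : (p.num + 1 == PySem.Str.len p.aliasStr) = false := by
      rw [beq_eq_false_iff_ne, hlen]; exact hd
    have hdl : ¬ p.num + 1 = (p.aliasStr.length : Int) := by rwa [String.length_toList] at hd
    simp only [hd', Bool.false_eq_true, if_false]
    simp [hdl]

lemma remOf_stepP (i : Int) (ch : Char) (p : PyProgress) (h : InvP p) :
    remOf (stepP i ch p) = chStep ch (remOf p) := by
  simp only [stepP]
  cases hrem : remOf p with
  | nil =>
    have hl : progLetter p = none := by rw [progLetter_eq_head p h, hrem]; rfl
    simp [hl, chStep, hrem]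
  | cons y rest =>
    have hl : progLetter p = some y := by rw [progLetter_eq_head p h, hrem]; rfl
    by_cases hy : y = ch
    · subst hy
      have hcond : (progLetter p == some y) = true := by simp [hl]
      rw [if_pos hcond]
      have hlt := num_lt_of_letter_some p h y hl
      have hnum := (num_progInc_of_lt p i hlt).1
      have halias := alias_progInc p i
      simp only [remOf, hnum, halias]
      have h0 := h.1
      have ht : (p.num + 1).toNat = p.num.toNat + 1 := by omega
      rw [ht, ← List.tail_drop]
      rw [show p.aliasStr.toList.drop p.num.toNat = remOf p from rfl, hrem]
      simp [chStep]
    · have hcond : ¬ (progLetter p == some ch) = true := by simp [hl, hy]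
      have hy' : ¬ ch = y := fun hc => hy hc.symm
      rw [if_neg hcond, hrem]
      simp [chStep, hy']

lemma alias_stepP (i : Int) (ch : Char) (p : PyProgress) :
    (stepP i ch p).aliasStr = p.aliasStr := by
  simp only [stepP]
  split
  · exact alias_progInc p i
  · rfl

lemma invP_stepP (i : Int) (ch : Char) (p : PyProgress) (h : InvP p) :
    InvP (stepP i ch p) := by
  simp only [stepP]
  split
  · next hm =>
    have hl : progLetter p = some ch := by
      cases hpl : progLetter p with
      | none => rw [hpl] at hm; simp at hm
      | some y => rw [hpl] at hm; simp at hm; simp [hm]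
    have h0 := h.1
    have hlt := num_lt_of_letter_some p h ch hl
    have hnum := (num_progInc_of_lt p i hlt).1
    have halias := alias_progInc p i
    constructor
    · rw [hnum]; omega
    · rw [hnum, halias]; omega
  · exact h

lemma donePB_eq (i : Int) (ch : Char) (p : PyProgress) (h : InvP p) :
    donePB i ch p = decide (remOf p = [ch]) := by
  simp only [donePB]
  cases hrem : remOf p with
  | nil =>
    have hl : progLetter p = none := by rw [progLetter_eq_head p h, hrem]; rfl
    simp [hl]
  | cons y rest =>
    have hl : progLetter p = some y := by rw [progLetter_eq_head p h, hrem]; rfl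
    by_cases hy : y = ch
    · subst hy
      have hcond : (progLetter p == some y) = true := by simp [hl]
      rw [hcond, Bool.true_and]
      have hlt := num_lt_of_letter_some p h y hl
      have hdone := (num_progInc_of_lt p i hlt).2
      have hlenr : (remOf p).length = p.aliasStr.toList.length - p.num.toNat := by
        simp only [remOf, List.length_drop]
      rw [hrem] at hlenr
      have h0 := h.1
      by_cases hrest : rest = []
      · subst hrest
        have hcl : p.num + 1 = (p.aliasStr.toList.length : Int) := by
          simp only [List.length_cons, List.length_nil] at hlenr
          omega
        simp [hdone.mpr hcl]
      · have hcl : ¬ (p.num + 1 = (p.aliasStr.toList.length : Int)) := by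
          have hlr : 1 ≤ rest.length := by
            cases rest with
            | nil => exact absurd rfl hrest
            | cons a b => simp
          simp only [List.length_cons] at hlenr
          omega
        have hd : (progInc p i).1 = false := by
          cases hq : (progInc p i).1 with
          | false => rfl
          | true => exact absurd (hdone.mp hq) hcl
        simp [hd, hrest]
    · have hcond : (progLetter p == some ch) = false := by simp [hl, hy]
      simp [hcond, hy]

lemma inner_fold (i : Int) (ch : Char) (interp : List PyProgress) :
    ∀ (acc : List PyProgress) (tr : List String),
    interp.foldl (innerStep i ch) (acc, tr) =
      (acc ++ interp.map (stepP i ch), tr ++ (interp.filter (donePB i ch)).map (·.aliasStr)) := by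
  induction interp with
  | nil => intro acc tr; simp
  | cons p rest ih =>
    intro acc tr
    simp only [List.foldl_cons]
    by_cases hm : (progLetter p == some ch) = true
    · have hst : stepP i ch p = (progInc p i).2 := by simp [stepP, hm]
      by_cases hdn : (progInc p i).1 = true
      · have hstep : innerStep i ch (acc, tr) p =
            (acc ++ [(progInc p i).2], tr ++ [(progInc p i).2.aliasStr]) := by
          simp [innerStep, hm, hdn]
        have hdp : donePB i ch p = true := by simp [donePB, hm, hdn]
        rw [hstep, ih]
        simp [hst, hdp, alias_progInc]
      · have hstep : innerStep i ch (acc, tr) p = (acc ++ [(progInc p i).2], tr) := by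
          simp [innerStep, hm, hdn]
        have hdp : donePB i ch p = false := by simp [donePB, hm, hdn]
        rw [hstep, ih]
        simp [hst, hdp]
    · have hstep : innerStep i ch (acc, tr) p = (acc ++ [p], tr) := by
        simp [innerStep, hm]
      have hst : stepP i ch p = p := by simp [stepP, hm]
      have hdp : donePB i ch p = false := by simp [donePB, hm]
      rw [hstep, ih]
      simp [hst, hdp]

lemma group_shift (i : Int) (ch : Char) (w' : List Char) (interp : List PyProgress)
    (hinv : ∀ p ∈ interp, InvP p) (t : Nat) :
    ((interp.map (stepP i ch)).filter (fun p => findEnd w' (remOf p) == some (t : Int))).map (·.aliasStr)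
      = (interp.filter (fun p => findEnd (ch :: w') (remOf p) == some ((t : Int) + 1))).map (·.aliasStr) := by
  rw [List.filter_map, List.map_map]
  have h1 : ∀ p ∈ interp,
      ((fun p => findEnd w' (remOf p) == some (t : Int)) ∘ stepP i ch) p
        = (fun p => findEnd (ch :: w') (remOf p) == some ((t : Int) + 1)) p := by
    intro p hp
    simp only [Function.comp]
    rw [remOf_stepP i ch p (hinv p hp)]
    rw [Bool.eq_iff_iff]
    simp only [beq_iff_eq]
    exact (findEnd_cons_succ ch w' (remOf p) (t : Int) (Int.natCast_nonneg t)).symm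
  rw [List.filter_congr h1]
  exact List.map_congr_left (fun p _ => alias_stepP i ch p)

lemma group_zero (i : Int) (ch : Char) (w' : List Char) (interp : List PyProgress)
    (hinv : ∀ p ∈ interp, InvP p) :
    (interp.filter (donePB i ch)).map (·.aliasStr)
      = (interp.filter (fun p => findEnd (ch :: w') (remOf p) == some ((0 : Nat) : Int))).map (·.aliasStr) := by
  apply congrArg
  apply List.filter_congr
  intro p hp
  rw [donePB_eq i ch p (hinv p hp)]
  rw [Bool.eq_iff_iff]
  simp only [decide_eq_true_eq, beq_iff_eq, Nat.cast_zero]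
  exact (findEnd_cons_zero ch w' (remOf p)).symm

lemma outer_spec : ∀ (w : List Char) (interp : List PyProgress) (tr : List String) (i : Int),
    (∀ p ∈ interp, InvP p) →
    (w.foldl outerStep (interp, (tr, i))).2.1 =
      tr ++ (List.range w.length).flatMap
        (fun (t : Nat) => (interp.filter (fun p => findEnd w (remOf p) == some (t : Int))).map (·.aliasStr)) := by
  intro w
  induction w with
  | nil => intro interp tr i _; simp
  | cons ch w' ih =>
    intro interp tr i hinv
    simp only [List.foldl_cons]
    have houter : outerStep (interp, (tr, i)) ch =
        (interp.map (stepP i ch), (tr ++ (interp.filter (donePB i ch)).map (·.aliasStr), i + 1)) := by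
      simp only [outerStep, inner_fold, List.nil_append]
    rw [houter, ih _ _ _ (by
      intro p hp
      rw [List.mem_map] at hp
      obtain ⟨q, hq, rfl⟩ := hp
      exact invP_stepP i ch q (hinv q hq))]
    rw [List.length_cons, List.range_succ_eq_map, List.flatMap_cons, List.flatMap_map,
      List.append_assoc]
    congr 1
    congr 1
    · exact group_zero i ch w' interp hinv
    · have hg : ∀ t : Nat,
          ((interp.map (stepP i ch)).filter (fun p => findEnd w' (remOf p) == some (t : Int))).map (·.aliasStr)
            = (interp.filter (fun p => findEnd (ch :: w') (remOf p) == some ((t.succ : Nat) : Int))).map (·.aliasStr) := by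
        intro t
        rw [group_shift i ch w' interp hinv t]
        norm_num [Nat.succ_eq_add_one]
      simp only [hg]

lemma get_triggers_eq_spec (word : String) (commands : List String) :
    get_triggers word commands = triggersSpec word.toList commands := by
  unfold get_triggers triggersSpec
  rw [outer_spec _ _ _ _ (by
    intro p hp
    rw [List.mem_map] at hp
    obtain ⟨c, hc, rfl⟩ := hp
    exact ⟨le_refl 0, Int.natCast_nonneg _⟩)]
  rw [List.nil_append]
  have hg : ∀ t : Nat,
      ((commands.map (fun command =>
          ({ aliasStr := command, num := 0, aliasStart := -1, aliasEnd := -1,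
             totalLocationValue := 0 } : PyProgress))).filter
        (fun p => findEnd word.toList (remOf p) == some (t : Int))).map (·.aliasStr)
        = commands.filter (fun c => findEnd word.toList c.toList == some (t : Int)) := by
    intro t
    rw [List.filter_map, List.map_map]
    have : ∀ c : String,
        ((fun p => findEnd word.toList (remOf p) == some (t : Int)) ∘ (fun command =>
          ({ aliasStr := command, num := 0, aliasStart := -1, aliasEnd := -1,
             totalLocationValue := 0 } : PyProgress))) c
          = (fun c => findEnd word.toList c.toList == some (t : Int)) c := by
      intro c
      simp [remOf]
    rw [List.filter_congr (fun c _ => this c)]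
    exact (List.map_congr_left (fun c _ => rfl)).trans (List.map_id _)
  simp only [hg]

lemma matchEndGo_spec (cmd : List Char) : ∀ (w : List Char) (i0 : Int) (j : Nat), j < cmd.length →
    matchEndGo cmd (PySem.List.enumerate w i0) ((j : Nat) : Int) = (findEnd w (cmd.drop j)).map (· + i0) := by
  intro w
  induction w with
  | nil =>
    intro i0 j hj
    rw [List.drop_eq_getElem_cons hj]
    simp [PySem.List.enumerate, matchEndGo, findEnd]
  | cons x w' ih =>
    intro i0 j hj
    rw [PySem.List.enumerate_cons]
    simp only [matchEndGo]
    rw [PySem.List.pyGet?_natCast]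
    rw [List.getElem?_eq_getElem hj]
    rw [List.drop_eq_getElem_cons hj]
    by_cases hx : cmd[j] = x
    · have hc : (some cmd[j] == some x) = true := by simp [hx]
      rw [if_pos hc]
      by_cases hl : j + 1 = cmd.length
      · have hc2 : ((j : Int) + 1 == PySem.List.len cmd) = true := by
          rw [beq_iff_eq, PySem.List.len_eq]
          exact_mod_cast hl
        rw [if_pos hc2]
        have hdrop : cmd.drop (j + 1) = [] := List.drop_eq_nil_of_le (by omega)
        simp only [findEnd, chStep, hdrop, hx]
        simp
      · have hc2 : ¬ ((j : Int) + 1 == PySem.List.len cmd) = true := by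
          rw [beq_iff_eq, PySem.List.len_eq]
          intro hcon
          exact hl (by exact_mod_cast hcon)
        rw [if_neg hc2]
        have hj1 : j + 1 < cmd.length := by omega
        have hih := ih (i0 + 1) (j + 1) hj1
        rw [show ((j : Int) + 1) = (((j + 1 : Nat)) : Int) by push_cast; ring, hih]
        have hdrop : cmd.drop (j + 1) ≠ [] := by
          intro hcon
          have := congrArg List.length hcon
          simp at this
          omega
        rw [hx, findEnd_cons_eq x w' _ hdrop]
        cases hfe : findEnd w' (cmd.drop (j + 1)) with
        | none => simp
        | some s => simp only [Option.map_some, Option.some.injEq]; ring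
    · have hc : ¬ (some cmd[j] == some x) = true := by simp [hx]
      rw [if_neg hc]
      have hih := ih (i0 + 1) j hj
      rw [hih]
      have hne : ¬ (x = cmd[j]) := fun hcon => hx hcon.symm
      rw [findEnd_cons_ne x cmd[j] w' _ hne]
      rw [← List.drop_eq_getElem_cons hj]
      cases hfe : findEnd w' (cmd.drop j) with
      | none => simp
      | some s => simp only [Option.map_some, Option.some.injEq]; ring

lemma matchEndGo_nil (pairs : List (Int × Char)) : ∀ j, matchEndGo [] pairs j = none := by
  induction pairs with
  | nil => intro j; rfl
  | cons p rest ih =>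
    intro j
    obtain ⟨i, ch⟩ := p
    simp only [matchEndGo]
    rw [if_neg (by simp [PySem.List.pyGet?])]
    exact ih j

lemma matchEnd_eq_findEnd (w cmd : List Char) : matchEnd w cmd = findEnd w cmd := by
  cases cmd with
  | nil => rw [findEnd_nil_right]; exact matchEndGo_nil _ 0
  | cons y c' =>
    have h0 : (0 : Nat) < (y :: c').length := by simp
    have := matchEndGo_spec (y :: c') w 0 0 h0
    rw [show (((0 : Nat) : Int)) = (0 : Int) by norm_num] at this
    rw [matchEnd, this, List.drop_zero]
    cases findEnd w (y :: c') <;> simp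

lemma altStep_eq (w : List Char) (d : PySem.Dict Int (List String)) (c : String) :
    altStep w d c =
      if (findEnd w c.toList).isSome then
        d.modify ((findEnd w c.toList).getD 0) [] (fun v => v ++ [c])
      else d := by
  unfold altStep
  rw [matchEnd_eq_findEnd]
  by_cases hc : c = ""
  · subst hc
    rw [if_pos (by rfl)]
    rw [show ("" : String).toList = [] from rfl, findEnd_nil_right]
    rfl
  · rw [if_neg (by simp [hc])]
    cases h : findEnd w c.toList with
    | none => simp
    | some e => simp

lemma byEnd_eq (w : List Char) (commands : List String) :
    commands.foldl (altStep w) PySem.Dict.empty =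
      ((commands.filter (fun c => (findEnd w c.toList).isSome)).map
          (fun c => ((findEnd w c.toList).getD 0, c))).foldl
        (fun d p => d.modify p.1 [] (fun v => v ++ [p.2])) PySem.Dict.empty := by
  have h1 := PySem.List.foldl_congr_mem (l := commands)
    (init := (PySem.Dict.empty : PySem.Dict Int (List String))) (f := altStep w)
    (g := fun d c => if (findEnd w c.toList).isSome then
        d.modify ((findEnd w c.toList).getD 0) [] (fun v => v ++ [c]) else d)
    (fun d c _ => altStep_eq w d c)
  rw [h1, PySem.List.foldl_if_eq_foldl_filter, List.foldl_map]

lemma byEnd_getD (w : List Char) (commands : List String) (e : Int) :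
    (commands.foldl (altStep w) PySem.Dict.empty).getD e [] =
      commands.filter (fun c => findEnd w c.toList == some e) := by
  rw [byEnd_eq, PySem.Dict.getD_foldl_modify_append, PySem.Dict.getD_empty, List.nil_append]
  rw [List.filter_map, List.map_map]
  have h1 : ((fun (p : Int × String) => p.1 == e) ∘ fun c => ((findEnd w c.toList).getD 0, c))
      = fun c => (findEnd w c.toList).getD 0 == e := rfl
  rw [h1]
  rw [show ((fun (p : Int × String) => p.2) ∘ fun c => ((findEnd w c.toList).getD 0, c))
      = fun c => c from rfl]
  rw [List.map_id', List.filter_filter]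
  apply List.filter_congr
  intro c _
  cases h : findEnd w c.toList with
  | none => simp
  | some a => simp

lemma byEnd_keys (w : List Char) (commands : List String) :
    (commands.foldl (altStep w) PySem.Dict.empty).keys =
      PySem.Set.ofList ((commands.filter (fun c => (findEnd w c.toList).isSome)).map
        (fun c => (findEnd w c.toList).getD 0)) := by
  rw [byEnd_eq]
  rw [PySem.Dict.keys_foldl_modify_key _ Prod.fst [] (fun _ p => (fun v => v ++ [p.2]))]
  rw [PySem.Dict.keys_empty, PySem.Set.update_nil_left, List.map_map]
  rfl

lemma mem_byEnd_keys (w : List Char) (commands : List String) (e : Int) :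
    e ∈ (commands.foldl (altStep w) PySem.Dict.empty).keys ↔
      ∃ c ∈ commands, findEnd w c.toList = some e := by
  rw [byEnd_keys, PySem.Set.mem_ofList, List.mem_map]
  constructor
  · rintro ⟨c, hc, rfl⟩
    rw [List.mem_filter] at hc
    refine ⟨c, hc.1, ?_⟩
    cases h : findEnd w c.toList with
    | none => rw [h] at hc; simp at hc
    | some a => simp
  · rintro ⟨c, hc, h⟩
    refine ⟨c, ?_, ?_⟩
    · rw [List.mem_filter]
      exact ⟨hc, by simp [h]⟩
    · simp [h]

lemma get_triggers_alt_eq_spec (word : String) (commands : List String) :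
    get_triggers_alt word commands = triggersSpec word.toList commands := by
  unfold get_triggers_alt
  show (PySem.List.sorted (commands.foldl (altStep word.toList) PySem.Dict.empty).keys
      (fun e => e)).flatMap
    (fun e => (commands.foldl (altStep word.toList) PySem.Dict.empty).getD e []) =
      triggersSpec word.toList commands
  set w := word.toList with hw
  set byEnd := commands.foldl (altStep w) PySem.Dict.empty with hbe
  have hnd : byEnd.keys.Nodup := by
    rw [hbe, byEnd_keys]
    exact PySem.Set.nodup_ofList _
  have hbound : ∀ e ∈ byEnd.keys, 0 ≤ e ∧ e < (w.length : Int) := by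
    intro e he
    rw [hbe, mem_byEnd_keys] at he
    obtain ⟨c, _, hc⟩ := he
    exact findEnd_bounds w _ _ hc
  have hsorted : PySem.List.sorted byEnd.keys (fun e => e) =
      (PySem.List.pyRange 0 (w.length : Int) 1).filter (fun e => decide (e ∈ byEnd.keys)) := by
    apply PySem.List.sorted_eq_of_perm_of_pairwise_lt
    · rw [List.perm_ext_iff_of_nodup
        ((PySem.List.nodup_pyRange_one 0 (w.length : Int)).filter _) hnd]
      intro e
      rw [List.mem_filter, PySem.List.mem_pyRange_one]
      constructor
      · rintro ⟨_, he⟩; exact of_decide_eq_true he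
      · intro he
        exact ⟨hbound e he, by simp [he]⟩
    · exact (PySem.List.pairwise_lt_pyRange_one 0 (w.length : Int)).filter _
  rw [hsorted]
  have hdrop : ∀ (l : List Int),
      (l.filter (fun e => decide (e ∈ byEnd.keys))).flatMap (fun e => byEnd.getD e []) =
        l.flatMap (fun e => if e ∈ byEnd.keys then byEnd.getD e [] else []) := by
    intro l
    induction l with
    | nil => rfl
    | cons a t ih =>
      by_cases ha : a ∈ byEnd.keys
      · simp only [List.filter_cons, List.flatMap_cons, ha, decide_true, if_true, ih]
      · simp only [List.filter_cons, List.flatMap_cons, ha, decide_false, if_false, ih,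
          Bool.false_eq_true, List.nil_append]
  rw [hdrop]
  have hbody : ∀ e : Int,
      (if e ∈ byEnd.keys then byEnd.getD e [] else []) =
        commands.filter (fun c => findEnd w c.toList == some e) := by
    intro e
    by_cases he : e ∈ byEnd.keys
    · rw [if_pos he, hbe, byEnd_getD]
    · rw [if_neg he]
      symm
      rw [List.filter_eq_nil_iff]
      intro c hc hcon
      rw [beq_iff_eq] at hcon
      exact he ((hbe ▸ (mem_byEnd_keys w commands e)).mpr ⟨c, hc, hcon⟩)
  simp only [hbody]
  rw [PySem.List.pyRange_one, List.flatMap_map]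
  unfold triggersSpec
  simp only [zero_add]
  rw [show (((w.length : Int)) - 0).toNat = w.length by omega]

-- ===== VERDICT (by name: the statement is the Claim_ definition above) =====
theorem get_triggers_spec : Claim_equal_get_triggers := by
  intro word commands _
  unfold Spec_get_triggers
  rw [get_triggers_eq_spec, get_triggers_alt_eq_spec]
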